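-- pv_equiv track=rewrite | github.com/Illya-Bonikon/CPSD | LAB5/backend/app/algorithms/genetic.py | _create_child_path
-- ===== SOURCE A (Python) =====
-- from typing import List, Tuple, Optional
--
-- def _create_child_path(parent1_path: List[int], parent2_path: List[int], point: int) -> List[int]:
--
--     size = len(parent1_path)
--     child_path = [-1] * size
--
--     child_path[:point] = parent1_path[:point]
--
--     for i in range(size):
--         if child_path[i] == -1:
--             for gene in parent2_path:
--                 if gene not in child_path:
--                     child_path[i] = gene
--                     break
--
--     return child_path
-- ===== SOURCE B (Python) =====
-- from typing import List
--
-- def _create_child_path(parent1_path: List[int], parent2_path: List[int], point: int) -> List[int]: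
--     size = len(parent1_path)
--     # child starts as the parent1 prefix, padded with -1 hole markers to full length
--     child = (parent1_path[:point] + [-1] * size)[:size]
--     present = set(child)
--     fresh = []
--     for g in parent2_path:
--         if g not in present:
--             fresh.append(g)
--             present.add(g)
--     it = iter(fresh)
--     # fill each hole, left to right, with the next fresh gene; unfillable holes stay holes
--     return [x if x != -1 else next(it, -1) for x in child]
-- ===== Notes on version B (the rewrite author's own statement) =====
-- stated objective: faster
-- what changed: A rescans parent2 and the whole child list for every unfilled slot; B builds the hole-marked child once, collects the fresh genes of parent2 in a single pass over a growing 'present' set, and fills the holes in one left-to-right substitution pass.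
import Mathlib
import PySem

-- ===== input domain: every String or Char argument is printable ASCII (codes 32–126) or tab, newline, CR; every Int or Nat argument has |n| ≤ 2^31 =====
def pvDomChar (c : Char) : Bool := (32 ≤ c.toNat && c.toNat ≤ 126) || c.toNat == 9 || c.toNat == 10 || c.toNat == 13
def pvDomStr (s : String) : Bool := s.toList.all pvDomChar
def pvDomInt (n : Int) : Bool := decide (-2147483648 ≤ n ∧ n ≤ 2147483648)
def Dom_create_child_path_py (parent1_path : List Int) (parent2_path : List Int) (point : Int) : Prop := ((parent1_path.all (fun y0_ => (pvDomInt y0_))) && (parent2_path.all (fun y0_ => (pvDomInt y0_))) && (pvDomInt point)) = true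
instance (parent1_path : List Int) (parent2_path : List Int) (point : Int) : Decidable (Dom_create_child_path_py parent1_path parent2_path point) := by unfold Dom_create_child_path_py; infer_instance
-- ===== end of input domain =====

-- B replaces A's per-slot rescans of parent2 and of the child by one fresh-gene pass over
-- parent2 against a growing 'present' set plus one hole-filling pass (objective: faster).

-- ===== PORT A =====
-- inner loop: 'for gene in parent2_path: if gene not in child_path: child_path[i] = gene; break'
def pvInnerA (child : List Int) (i : Nat) : List Int → List Int
  | [] => child
  | g :: rest => if g ∈ child then pvInnerA child i rest else child.set i g

-- outer loop: 'for i in range(size): if child_path[i] == -1: …'; i is always < child.length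
def pvOuterA (p2 : List Int) : List Int → Nat → Nat → List Int
  | child, _, 0 => child
  | child, i, n+1 =>
      pvOuterA p2 (if child.getD i 0 = -1 then pvInnerA child i p2 else child) (i+1) n

def create_child_path_py (parent1_path : List Int) (parent2_path : List Int) (point : Int) : List Int :=
  let size := parent1_path.length
  -- child_path = [-1]*size; child_path[:point] = parent1_path[:point]: the removed and the
  -- inserted slice have the same length (both lists have length size), so the assignment
  -- yields the inserted slice followed by the untouched rest of [-1]*size
  let seg := PySem.List.slice parent1_path none (some point)
  let child := seg ++ (List.replicate size (-1 : Int)).drop seg.length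
  pvOuterA parent2_path child 0 size

-- ===== PORT B =====
-- 'for g in parent2_path: if g not in present: fresh.append(g); present.add(g)'
def pvFillAlt : List Int → PySem.Set Int → List Int → List Int
  | [], _, fresh => fresh
  | g :: rest, present, fresh =>
      if !(PySem.Set.contains present g) then
        pvFillAlt rest (PySem.Set.add present g) (fresh ++ [g])
      else pvFillAlt rest present fresh

-- '[x if x != -1 else next(it, -1) for x in child]' — threads the iterator's rest
def pvOutAlt : List Int → List Int → List Int
  | [], _ => []
  | x :: xs, fresh =>
      if x != -1 then x :: pvOutAlt xs fresh
      else
        match fresh with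
        | [] => (-1) :: pvOutAlt xs []
        | g :: gs => g :: pvOutAlt xs gs

def create_child_path_py_alt (parent1_path : List Int) (parent2_path : List Int) (point : Int) : List Int :=
  let size := parent1_path.length
  -- child = (parent1_path[:point] + [-1] * size)[:size]
  let child := PySem.List.slice
    (PySem.List.slice parent1_path none (some point) ++ List.replicate size (-1 : Int))
    none (some (size : Int))
  let present := PySem.Set.ofList child
  let fresh := pvFillAlt parent2_path present []
  pvOutAlt child fresh

-- ===== PRECONDITION & SPEC =====
def Spec_create_child_path_py (parent1_path : List Int) (parent2_path : List Int) (point : Int) (out : List Int) : Prop := out = create_child_path_py_alt parent1_path parent2_path point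
instance (parent1_path : List Int) (parent2_path : List Int) (point : Int) (out : List Int) : Decidable (Spec_create_child_path_py parent1_path parent2_path point out) := by unfold Spec_create_child_path_py; infer_instance

-- ===== CLAIM (what is proved, stated in full; the proofs are below) =====
def Claim_equal_create_child_path_py : Prop := ∀ (parent1_path : List Int) (parent2_path : List Int) (point : Int), Dom_create_child_path_py parent1_path parent2_path point → Spec_create_child_path_py parent1_path parent2_path point (create_child_path_py parent1_path parent2_path point)

-- ===== LEMMAS AND PROOFS =====

-- proof-side view of B's fresh-gene pass, with a cons accumulator
def pvFreshC (u : PySem.Set Int) : List Int → List Int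
  | [] => []
  | g :: rest => if g ∉ u then g :: pvFreshC (PySem.Set.add u g) rest else pvFreshC u rest

-- the genes A's inner loop can ever pick, in the order it picks them: the distinct
-- elements of parent2 that are neither -1 nor already present
def pvFillC (u : PySem.Set Int) : List Int → List Int
  | [] => []
  | g :: rest =>
      if g ≠ -1 ∧ g ∉ u then g :: pvFillC (PySem.Set.add u g) rest else pvFillC u rest

lemma fillAlt_eq (p2 : List Int) : ∀ (u : PySem.Set Int) (acc : List Int),
    pvFillAlt p2 u acc = acc ++ pvFreshC u p2 := by
  induction p2 with
  | nil => intro u acc; simp [pvFillAlt, pvFreshC]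
  | cons g rest ih =>
      intro u acc
      by_cases h : g ∈ u
      · simp only [pvFillAlt, pvFreshC, ih]
        simp [h]
      · simp only [pvFillAlt, pvFreshC, ih]
        simp [h]

-- once -1 is present, B's guard 'g ∉ u' and A's guard 'g ≠ -1 ∧ g ∉ u' coincide
lemma freshC_eq_fillC : ∀ (p2 : List Int) (u : PySem.Set Int), (-1 : Int) ∈ u →
    pvFreshC u p2 = pvFillC u p2 := by
  intro p2
  induction p2 with
  | nil => intro u _; rfl
  | cons g rest ih =>
      intro u hu
      by_cases h : g ∈ u
      · rw [pvFreshC, if_neg (by simp [h]), pvFillC, if_neg (by intro hc; exact hc.2 h)]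
        exact ih u hu
      · have hg : g ≠ -1 := by intro he; exact h (he ▸ hu)
        rw [pvFreshC, if_pos h, pvFillC, if_pos ⟨hg, h⟩]
        have : (-1 : Int) ∈ PySem.Set.add u g := by rw [PySem.Set.mem_add]; left; exact hu
        rw [ih _ this]

lemma outAlt_nil_fill (xs : List Int) : pvOutAlt xs [] = xs := by
  induction xs with
  | nil => simp [pvOutAlt]
  | cons x xs ih =>
      by_cases h : x = -1 <;> simp [pvOutAlt, h, ih]

lemma outAlt_no_hole (xs : List Int) (h : (-1 : Int) ∉ xs) :
    ∀ fresh, pvOutAlt xs fresh = xs := by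
  induction xs with
  | nil => intro fresh; simp [pvOutAlt]
  | cons x xs ih =>
      intro fresh
      have hx : x ≠ -1 := fun he => h (he ▸ List.mem_cons_self)
      have hxs : (-1 : Int) ∉ xs := fun hm => h (List.mem_cons_of_mem _ hm)
      simp [pvOutAlt, hx, ih hxs]

lemma getD_mid (a b : List Int) (x d : Int) : (a ++ x :: b).getD a.length d = x := by
  induction a with
  | nil => simp [List.getD]
  | cons y ys ih => simp only [List.cons_append, List.length_cons, List.getD_cons_succ]; exact ih

lemma set_mid (a b : List Int) (x g : Int) : (a ++ x :: b).set a.length g = a ++ g :: b := by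
  induction a with
  | nil => simp
  | cons y ys ih => simp [ih]

lemma innerA_nil (c : List Int) (i : Nat) (u : PySem.Set Int)
    (hmem : ∀ g : Int, g ∈ c ↔ g = -1 ∨ g ∈ u) :
    ∀ p2 : List Int, pvFillC u p2 = [] → pvInnerA c i p2 = c := by
  intro p2
  induction p2 with
  | nil => intro _; rfl
  | cons g rest ih =>
      intro hfc
      by_cases h : g ≠ -1 ∧ g ∉ u
      · rw [pvFillC, if_pos h] at hfc
        exact absurd hfc (by simp)
      · have hgc : g ∈ c := by
          rcases not_and_or.mp h with h1 | h2
          · simp at h1; exact (hmem g).mpr (Or.inl h1)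
          · simp at h2; exact (hmem g).mpr (Or.inr h2)
        rw [pvFillC, if_neg h] at hfc
        rw [pvInnerA, if_pos hgc]
        exact ih hfc

lemma innerA_cons (c : List Int) (i : Nat) (u : PySem.Set Int)
    (hmem : ∀ g : Int, g ∈ c ↔ g = -1 ∨ g ∈ u) :
    ∀ p2 g gs, pvFillC u p2 = g :: gs → pvInnerA c i p2 = c.set i g := by
  intro p2
  induction p2 with
  | nil => intro g gs h; simp [pvFillC] at h
  | cons x rest ih =>
      intro g gs hfc
      by_cases h : x ≠ -1 ∧ x ∉ u
      · rw [pvFillC, if_pos h] at hfc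
        have hxg : x = g := (List.cons.injEq _ _ _ _ ▸ hfc).1
        have hxc : x ∉ c := by
          intro hx
          rcases (hmem x).mp hx with h1 | h2
          · exact h.1 h1
          · exact h.2 h2
        rw [pvInnerA, if_neg hxc, hxg]
      · have hxc : x ∈ c := by
          rcases not_and_or.mp h with h1 | h2
          · simp at h1; exact (hmem x).mpr (Or.inl h1)
          · simp at h2; exact (hmem x).mpr (Or.inr h2)
        rw [pvFillC, if_neg h] at hfc
        rw [pvInnerA, if_pos hxc]
        exact ih g gs hfc

lemma fillC_restart (g : Int) : ∀ (p2 : List Int) (u : PySem.Set Int) (gs : List Int),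
    pvFillC u p2 = g :: gs → pvFillC (PySem.Set.add u g) p2 = gs := by
  intro p2
  induction p2 with
  | nil => intro u gs h; simp [pvFillC] at h
  | cons x rest ih =>
      intro u gs hfc
      by_cases h : x ≠ -1 ∧ x ∉ u
      · rw [pvFillC, if_pos h] at hfc
        have hxg : x = g := (List.cons.injEq _ _ _ _ ▸ hfc).1
        have hgs : pvFillC (PySem.Set.add u x) rest = gs := (List.cons.injEq _ _ _ _ ▸ hfc).2
        have hmemadd : x ∈ PySem.Set.add u g := by
          rw [PySem.Set.mem_add]; right; exact hxg
        rw [pvFillC, if_neg (by simp [hmemadd])]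
        rw [← hxg]; exact hgs
      · have hx : ¬ (x ≠ -1 ∧ x ∉ PySem.Set.add u g) := by
          rcases not_and_or.mp h with h1 | h2
          · exact fun hc => hc.1 (by simpa using h1)
          · simp at h2
            exact fun hc => hc.2 (by rw [PySem.Set.mem_add]; left; exact h2)
        rw [pvFillC, if_neg h] at hfc
        rw [pvFillC, if_neg hx]
        exact ih u gs hfc

lemma outerA_eq (p2 : List Int) :
    ∀ (todo done : List Int) (u : PySem.Set Int),
      (∀ g : Int, g ≠ -1 → ((g ∈ done ∨ g ∈ todo) ↔ g ∈ u)) →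
      pvOuterA p2 (done ++ todo) done.length todo.length
        = done ++ pvOutAlt todo (pvFillC u p2) := by
  intro todo
  induction todo with
  | nil => intro done u _; simp [pvOuterA, pvOutAlt]
  | cons x xs ih =>
      intro done u hmem
      have hget : (done ++ x :: xs).getD done.length 0 = x := getD_mid done xs x 0
      by_cases hx : x = -1
      · -- the slot is unfilled: run the inner search
        subst hx
        have hmem' : ∀ g : Int, g ∈ done ++ (-1) :: xs ↔ g = -1 ∨ g ∈ u := by
          intro g
          constructor
          · intro hg
            by_cases hg1 : g = -1
            · exact Or.inl hg1
            · right
              rcases List.mem_append.mp hg with h | h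
              · exact (hmem g hg1).mp (Or.inl h)
              · rcases List.mem_cons.mp h with h' | h'
                · exact absurd h' hg1
                · exact (hmem g hg1).mp (Or.inr (List.mem_cons.mpr (Or.inr h')))
          · intro hg
            rcases hg with hg | hg
            · subst hg; exact List.mem_append.mpr (Or.inr List.mem_cons_self)
            · by_cases hg1 : g = -1
              · subst hg1; exact List.mem_append.mpr (Or.inr List.mem_cons_self)
              · rcases (hmem g hg1).mpr hg with h | h
                · exact List.mem_append.mpr (Or.inl h)
                · exact List.mem_append.mpr (Or.inr h)
        cases hfc : pvFillC u p2 with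
        | nil =>
            have hin : pvInnerA (done ++ (-1) :: xs) done.length p2 = done ++ (-1) :: xs :=
              innerA_nil _ _ u hmem' p2 hfc
            have step : pvOuterA p2 (done ++ (-1) :: xs) done.length (xs.length + 1)
                = pvOuterA p2 ((done ++ [(-1)]) ++ xs) (done ++ [(-1)]).length xs.length := by
              rw [pvOuterA, if_pos hget, hin]
              simp
            have hmem2 : ∀ g : Int, g ≠ -1 → ((g ∈ done ++ [(-1 : Int)] ∨ g ∈ xs) ↔ g ∈ u) := by
              intro g hg
              have := hmem g hg
              simp only [List.mem_append, List.mem_cons, List.not_mem_nil, or_false] at this ⊢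
              tauto
            rw [List.length_cons, step, ih (done ++ [(-1)]) u hmem2, hfc]
            simp [pvOutAlt, outAlt_nil_fill]
        | cons g gs =>
            have hin : pvInnerA (done ++ (-1) :: xs) done.length p2
                = (done ++ (-1) :: xs).set done.length g :=
              innerA_cons _ _ u hmem' p2 g gs hfc
            have hset : (done ++ (-1) :: xs).set done.length g = done ++ g :: xs :=
              set_mid done xs (-1) g
            have step : pvOuterA p2 (done ++ (-1) :: xs) done.length (xs.length + 1)
                = pvOuterA p2 ((done ++ [g]) ++ xs) (done ++ [g]).length xs.length := by
              rw [pvOuterA, if_pos hget, hin, hset]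
              simp
            have hrest : pvFillC (PySem.Set.add u g) p2 = gs := fillC_restart g p2 u gs hfc
            have hmem2 : ∀ e : Int, e ≠ -1 →
                ((e ∈ done ++ [g] ∨ e ∈ xs) ↔ e ∈ PySem.Set.add u g) := by
              intro e he
              have hold := hmem e he
              rw [PySem.Set.mem_add]
              simp only [List.mem_append, List.mem_cons, List.not_mem_nil, or_false] at hold ⊢
              tauto
            rw [List.length_cons, step, ih (done ++ [g]) (PySem.Set.add u g) hmem2, hrest]
            simp [pvOutAlt]
      · -- the slot already holds a parent1 gene: the step leaves the child unchanged
        have step : pvOuterA p2 (done ++ x :: xs) done.length (xs.length + 1)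
            = pvOuterA p2 ((done ++ [x]) ++ xs) (done ++ [x]).length xs.length := by
          rw [pvOuterA, if_neg (by rw [hget]; exact hx)]
          simp
        have hmem2 : ∀ g : Int, g ≠ -1 → ((g ∈ done ++ [x] ∨ g ∈ xs) ↔ g ∈ u) := by
          intro g hg
          have := hmem g hg
          simp only [List.mem_append, List.mem_cons, List.not_mem_nil, or_false] at this ⊢
          tauto
        rw [List.length_cons, step, ih (done ++ [x]) u hmem2]
        simp [pvOutAlt, hx]

-- the prefix slice parent1_path[:point] is a 'take' of parent1_path
lemma slice_prefix_is_take (p1 : List Int) (point : Int) :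
    ∃ t : Nat, PySem.List.slice p1 none (some point) = p1.take t := by
  cases point with
  | ofNat n =>
      refine ⟨n, ?_⟩
      have hcast : (Int.ofNat n) = ((n : Nat) : Int) := rfl
      rw [hcast, PySem.List.slice_to_natCast]
  | negSucc n =>
      refine ⟨p1.length - (n + 1), ?_⟩
      have hcast : (Int.negSucc n) = -(((n + 1 : Nat) : Nat) : Int) := by
        simp [Int.negSucc_eq]
      rw [hcast, PySem.List.slice_to_neg_natCast p1 (n + 1) (Nat.succ_pos n)]

-- ===== VERDICT (by name: the statement is the Claim_ definition above) =====
theorem create_child_path_py_spec : Claim_equal_create_child_path_py := by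
  intro p1 p2 point _
  unfold Spec_create_child_path_py create_child_path_py create_child_path_py_alt
  simp only []
  obtain ⟨t, ht⟩ := slice_prefix_is_take p1 point
  set s := PySem.List.slice p1 none (some point) with hs
  have hslen : s.length ≤ p1.length := by
    rw [ht]; simp
  have hdrop : (List.replicate p1.length (-1 : Int)).drop s.length
      = List.replicate (p1.length - s.length) (-1 : Int) := by
    simp [List.drop_replicate]
  -- both constructions yield the same child: the prefix padded with holes to full length
  have hchildB : PySem.List.slice (s ++ List.replicate p1.length (-1 : Int))
      none (some ((p1.length : Nat) : Int))
      = s ++ (List.replicate p1.length (-1 : Int)).drop s.length := by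
    rw [PySem.List.slice_to_natCast, hdrop, List.take_append,
      List.take_of_length_le hslen, List.take_replicate]
    congr 1
    congr 1
    omega
  set child := s ++ (List.replicate p1.length (-1 : Int)).drop s.length with hc
  have hlen : child.length = p1.length := by
    rw [hc, hdrop]; simp; omega
  have hmem0 : ∀ g : Int, g ≠ -1 → ((g ∈ ([] : List Int) ∨ g ∈ child) ↔ g ∈ PySem.Set.ofList child) := by
    intro g _
    rw [PySem.Set.mem_ofList]
    simp
  have houter := outerA_eq p2 child [] (PySem.Set.ofList child) hmem0
  simp only [List.nil_append, List.length_nil] at houter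
  rw [hlen] at houter
  rw [houter, hchildB, fillAlt_eq, List.nil_append]
  by_cases hneg : (-1 : Int) ∈ child
  · rw [freshC_eq_fillC p2 _ (by rw [PySem.Set.mem_ofList]; exact hneg)]
  · rw [outAlt_no_hole child hneg, outAlt_no_hole child hneg]
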